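-- pv_equiv track=rewrite | github.com/GTimothee/optimize_io | dask_io/optimizer/find_proxies.py | standard_BFS
-- ===== SOURCE A (Python) =====
-- def standard_BFS(root, graph):
--     """ Apply a standard breadth first search algorithm on a graph stored in a dictionary.
--
--     return:
--     -------
--         visited: list of graph nodes reachable from root
--         max_depth: the maximum depth reached during the process i.e. the depth of the tree.
--     """
--     nodes = list(graph.keys())
--     queue = [(root, 0)]
--     visited = [root]
--
--     max_depth = 0
--     while len(queue) > 0:
--         node, depth = queue.pop(0)
--
--         if depth > max_depth:
--             max_depth = depth
--
--         try:  # we want to stop digging when node is a value i.e. a leaf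
--             hash(node)
--             if not node in graph:
--                 continue
--         except:
--             continue
--
--         neighbors = graph[node]
--         for n in neighbors:
--             if not n in visited:
--                 queue.append((n, depth + 1))
--                 visited.append(n)
--
--     return visited, max_depth
-- ===== SOURCE B (Python) =====
-- def standard_BFS(root, graph):
--     """Scan-pointer BFS: the visited list itself serves as the queue (a read index
--     advances over it), a parallel list records each node's depth, and the maximum
--     depth is simply the depth of the last node visited (depths are nondecreasing)."""
--     visited = [root]
--     depth = [0]
--     i = 0
--     while i < len(visited):
--         for n in graph.get(visited[i], []):
--             if n not in visited:
--                 visited.append(n)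
--                 depth.append(depth[i] + 1)
--         i += 1
--     return visited, depth[-1]
-- ===== Notes on version B (the rewrite author's own statement) =====
-- stated objective: alternative
-- what changed: Replaced the FIFO queue of (node, depth) pairs and the running max with a scan-pointer BFS: a read index advances over the growing visited list itself (no queue object, no pop(0)), a parallel depth list records levels, and max_depth is read off as the depth of the last visited node since BFS depths are nondecreasing.
import Mathlib
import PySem

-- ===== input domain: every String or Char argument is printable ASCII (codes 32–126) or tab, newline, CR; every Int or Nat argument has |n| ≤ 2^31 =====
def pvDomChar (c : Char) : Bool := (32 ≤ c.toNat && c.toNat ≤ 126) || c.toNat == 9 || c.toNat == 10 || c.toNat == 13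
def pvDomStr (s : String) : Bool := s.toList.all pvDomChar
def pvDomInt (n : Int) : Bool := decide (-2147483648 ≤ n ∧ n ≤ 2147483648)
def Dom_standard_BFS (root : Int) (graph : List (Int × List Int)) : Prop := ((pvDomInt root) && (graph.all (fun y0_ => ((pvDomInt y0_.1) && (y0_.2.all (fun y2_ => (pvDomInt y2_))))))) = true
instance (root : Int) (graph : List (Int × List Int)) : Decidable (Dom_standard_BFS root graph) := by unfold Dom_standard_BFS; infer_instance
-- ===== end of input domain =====

-- B replaces A's FIFO queue of (node, depth) pairs by a scan-pointer BFS: a read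
-- index advances over the growing visited list itself, a parallel list records
-- depths, and max_depth is the depth of the last visited node; return values are
-- proved identical.

-- all neighbor values occurring in the graph (used only for termination measures)
def pvFlat (graph : List (Int × List Int)) : List Int := graph.flatMap (fun p => p.2)

-- number of graph neighbor occurrences not yet visited (termination measure)
def pvUnvis (graph : List (Int × List Int)) (v : List Int) : Nat :=
  ((pvFlat graph).filter (fun x => decide (x ∉ v))).length

-- generic strict filter-length lemma used by the termination measures
theorem pvFilter_len_lt (l : List Int) (p q : Int → Bool) (h : ∀ a, p a = true → q a = true)
    (x : Int) (hx : x ∈ l) (hq : q x = true) (hp : ¬ p x = true) :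
    (l.filter p).length < (l.filter q).length := by
  induction l with
  | nil => cases hx
  | cons a l ih =>
    simp only [List.filter_cons]
    rcases List.mem_cons.1 hx with h1 | hx'
    · subst h1
      have hpa : p x = false := eq_false_of_ne_true hp
      have hle : (l.filter p).length ≤ (l.filter q).length := by
        simpa [List.countP_eq_length_filter] using
          List.countP_mono_left (l := l) (p := p) (q := q) (fun a _ => h a)
      simp [hpa, hq]
      omega
    · have hil := ih hx'
      by_cases hpa : p a = true
      all_goals cases hqa : q a
      · exact absurd (h a hpa) (by simp [hqa])
      · simp [hpa]; omega
      · simp [eq_false_of_ne_true hpa]; omega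
      · simp [eq_false_of_ne_true hpa]; omega

theorem pvUnvis_lt (graph : List (Int × List Int)) (v new : List Int) (hne : new ≠ [])
    (h : ∀ x ∈ new, x ∈ pvFlat graph ∧ x ∉ v) :
    pvUnvis graph (v ++ new) < pvUnvis graph v := by
  obtain ⟨x, hx⟩ := List.exists_mem_of_ne_nil new hne
  apply pvFilter_len_lt (pvFlat graph) _ _ _ x (h x hx).1
  · simpa using (h x hx).2
  · simp [List.mem_append, hx]
  · intro a ha
    simp only [decide_eq_true_eq] at ha ⊢
    intro hav; exact ha (List.mem_append.2 (Or.inl hav))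

theorem pvMem_flat_of_get? (graph : List (Int × List Int)) (k : Int) (ns : List Int) (n : Int)
    (h : (PySem.Dict.mk graph).get? k = some ns) (hn : n ∈ ns) : n ∈ pvFlat graph := by
  have hmem : (k, ns) ∈ (PySem.Dict.mk graph).items := PySem.Dict.mem_items_of_get?_eq_some _ h
  exact List.mem_flatMap.2 ⟨(k, ns), hmem, hn⟩

-- ===== PORT A =====
-- inner `for n in neighbors` body of A
def bfsStepA (depth : Int) (st : List (Int × Int) × List Int) (n : Int) :
    List (Int × Int) × List Int :=
  if n ∈ st.2 then st else (st.1 ++ [(n, depth + 1)], st.2 ++ [n])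

-- shape of the inner fold (needed by loopA's termination proof)
theorem bfsFoldA_spec (depth : Int) : ∀ (ns : List Int) (q : List (Int × Int)) (v : List Int),
    ∃ new : List Int, ns.foldl (bfsStepA depth) (q, v)
      = (q ++ new.map (fun n => (n, depth + 1)), v ++ new) ∧ ∀ x ∈ new, x ∈ ns ∧ x ∉ v := by
  intro ns
  induction ns with
  | nil => intro q v; exact ⟨[], by simp, by simp⟩
  | cons n ns ih =>
    intro q v
    by_cases hn : n ∈ v
    · obtain ⟨new, h1, h2⟩ := ih q v
      exact ⟨new, by simpa [bfsStepA, hn] using h1,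
        fun x hx => ⟨List.mem_cons_of_mem _ (h2 x hx).1, (h2 x hx).2⟩⟩
    · obtain ⟨new, h1, h2⟩ := ih (q ++ [(n, depth + 1)]) (v ++ [n])
      refine ⟨n :: new, ?_, ?_⟩
      · simpa [bfsStepA, hn, List.append_assoc] using h1
      · intro x hx
        rcases List.mem_cons.1 hx with rfl | hx'
        · exact ⟨List.mem_cons_self .., hn⟩
        · refine ⟨List.mem_cons_of_mem _ (h2 x hx').1, fun hv => (h2 x hx').2 ?_⟩
          exact List.mem_append.2 (Or.inl hv)

-- the `while len(queue) > 0` loop of A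
def loopA (graph : List (Int × List Int)) (queue : List (Int × Int)) (visited : List Int)
    (max_depth : Int) : List Int × Int :=
  match queue with
  | [] => (visited, max_depth)
  | (node, depth) :: rest =>
    let md := if depth > max_depth then depth else max_depth
    -- hash(node) never raises on an int; `node in graph` / `graph[node]` is this lookup
    match h : (PySem.Dict.mk graph).get? node with
    | none => loopA graph rest visited md
    | some neighbors =>
      let st := neighbors.foldl (bfsStepA depth) (rest, visited)
      loopA graph st.1 st.2 md
termination_by (pvUnvis graph visited, queue.length)
decreasing_by
  · exact Prod.Lex.right _ (by simp)
  · obtain ⟨new, hst, hnew⟩ := bfsFoldA_spec depth neighbors rest visited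
    by_cases hne : new = []
    · subst hne
      simp only [hst, List.map_nil, List.append_nil]
      exact Prod.Lex.right _ (by simp)
    · simp only [hst]
      exact Prod.Lex.left _ _ (pvUnvis_lt graph visited new hne
        (fun x hx => ⟨pvMem_flat_of_get? graph node neighbors x h (hnew x hx).1, (hnew x hx).2⟩))

def standard_BFS (root : Int) (graph : List (Int × List Int)) : List Int × Int :=
  -- `nodes = list(graph.keys())` is unused in A and dropped
  loopA graph [(root, 0)] [root] 0

-- ===== PORT B =====
-- inner `for n in graph.get(visited[i], [])` body of B; state = (visited, depth)
def scanStep (d : Int) (st : List Int × List Int) (n : Int) : List Int × List Int :=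
  if n ∈ st.1 then st else (st.1 ++ [n], st.2 ++ [d + 1])

-- shape of one scan step (needed by loopScan's termination proof)
theorem scanFold_spec (d : Int) : ∀ (ns v ds : List Int),
    ∃ new : List Int, ns.foldl (scanStep d) (v, ds)
      = (v ++ new, ds ++ new.map (fun _ => d + 1)) ∧ ∀ x ∈ new, x ∈ ns ∧ x ∉ v := by
  intro ns
  induction ns with
  | nil => intro v ds; exact ⟨[], by simp, by simp⟩
  | cons n ns ih =>
    intro v ds
    by_cases hn : n ∈ v
    · obtain ⟨new, h1, h2⟩ := ih v ds
      exact ⟨new, by simpa [scanStep, hn] using h1,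
        fun x hx => ⟨List.mem_cons_of_mem _ (h2 x hx).1, (h2 x hx).2⟩⟩
    · obtain ⟨new, h1, h2⟩ := ih (v ++ [n]) (ds ++ [d + 1])
      refine ⟨n :: new, ?_, ?_⟩
      · simpa [scanStep, hn, List.append_assoc] using h1
      · intro x hx
        rcases List.mem_cons.1 hx with rfl | hx'
        · exact ⟨List.mem_cons_self .., hn⟩
        · refine ⟨List.mem_cons_of_mem _ (h2 x hx').1, fun hv => (h2 x hx').2 ?_⟩
          exact List.mem_append.2 (Or.inl hv)

-- the `while i < len(visited)` loop of B; visited and depth grow in lockstep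
def loopScan (graph : List (Int × List Int)) (visited depth : List Int) (i : Nat) :
    List Int × Int :=
  if hi : i < visited.length then
    -- visited[i] / depth[i]: in bounds by the loop guard and the equal-length invariant, so getD is exact
    let d := depth.getD i 0
    let st := ((PySem.Dict.mk graph).getD (visited.getD i 0) []).foldl (scanStep d) (visited, depth)
    loopScan graph st.1 st.2 (i + 1)
  else
    -- depth[-1]: depth starts as [0] and never shrinks, so getLastD is exact
    (visited, depth.getLastD 0)
termination_by (pvUnvis graph visited, visited.length - i)
decreasing_by
  obtain ⟨new, hst, hnew⟩ :=
    scanFold_spec (depth.getD i 0) ((PySem.Dict.mk graph).getD (visited.getD i 0) []) visited depth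
  by_cases hne : new = []
  · subst hne
    simp only [hst, List.append_nil]
    exact Prod.Lex.right _ (by omega)
  · simp only [hst]
    refine Prod.Lex.left _ _ (pvUnvis_lt graph visited new hne (fun x hx => ⟨?_, (hnew x hx).2⟩))
    cases hg : (PySem.Dict.mk graph).get? (visited.getD i 0) with
    | none =>
      exfalso
      have hz : (PySem.Dict.mk graph).getD (visited.getD i 0) [] = [] := by
        rw [PySem.Dict.getD_eq_get?_getD, hg]; rfl
      rw [hz] at hnew
      simpa using (hnew x hx).1
    | some ns =>
      have hz : (PySem.Dict.mk graph).getD (visited.getD i 0) [] = ns := by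
        rw [PySem.Dict.getD_eq_get?_getD, hg]; rfl
      rw [hz] at hnew
      exact pvMem_flat_of_get? graph (visited.getD i 0) ns x hg (hnew x hx).1

def standard_BFS_alt (root : Int) (graph : List (Int × List Int)) : List Int × Int :=
  loopScan graph [root] [0] 0

-- ===== PRECONDITION & SPEC =====
def Spec_standard_BFS (root : Int) (graph : List (Int × List Int)) (out : List Int × Int) : Prop := out = standard_BFS_alt root graph
instance (root : Int) (graph : List (Int × List Int)) (out : List Int × Int) : Decidable (Spec_standard_BFS root graph out) := by unfold Spec_standard_BFS; infer_instance

-- ===== CLAIM (what is proved, stated in full; the proofs are below) =====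
def Claim_equal_standard_BFS : Prop := ∀ (root : Int) (graph : List (Int × List Int)), Dom_standard_BFS root graph → Spec_standard_BFS root graph (standard_BFS root graph)

-- ===== LEMMAS AND PROOFS =====

-- reading the element just after a prefix of known length
theorem pvGetD_middle (l₁ l₂ : List Int) (a : Int) :
    (l₁ ++ a :: l₂).getD l₁.length 0 = a := by
  simp [List.getD_eq_getElem?_getD]

-- joint shape of A's and B's inner folds: the SAME fresh-node list `new` is
-- appended on both sides (A tags the queue copy with depth+1).
theorem fold_corr (d : Int) : ∀ (ns : List Int) (q : List (Int × Int)) (v ds : List Int),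
    ∃ new : List Int,
      ns.foldl (bfsStepA d) (q, v) = (q ++ new.map (fun n => (n, d + 1)), v ++ new)
      ∧ ns.foldl (scanStep d) (v, ds) = (v ++ new, ds ++ new.map (fun _ => d + 1))
      ∧ ∀ x ∈ new, x ∈ ns ∧ x ∉ v := by
  intro ns
  induction ns with
  | nil => intro q v ds; exact ⟨[], by simp, by simp, by simp⟩
  | cons n ns ih =>
    intro q v ds
    by_cases hn : n ∈ v
    · obtain ⟨new, h1, h2, h3⟩ := ih q v ds
      exact ⟨new, by simpa [bfsStepA, hn] using h1, by simpa [scanStep, hn] using h2,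
        fun x hx => ⟨List.mem_cons_of_mem _ (h3 x hx).1, (h3 x hx).2⟩⟩
    · obtain ⟨new, h1, h2, h3⟩ := ih (q ++ [(n, d + 1)]) (v ++ [n]) (ds ++ [d + 1])
      refine ⟨n :: new, ?_, ?_, ?_⟩
      · simpa [bfsStepA, hn, List.append_assoc] using h1
      · simpa [scanStep, hn, List.append_assoc] using h2
      · intro x hx
        rcases List.mem_cons.1 hx with rfl | hx'
        · exact ⟨List.mem_cons_self .., hn⟩
        · refine ⟨List.mem_cons_of_mem _ (h3 x hx').1, fun hv => (h3 x hx').2 ?_⟩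
          exact List.mem_append.2 (Or.inl hv)

theorem zip_map_const (d : Int) (l : List Int) :
    l.zip (l.map fun _ => d) = l.map (fun n => (n, d)) := by
  induction l with
  | nil => rfl
  | cons a l ih => simp only [List.map_cons, List.zip_cons_cons, ih]

theorem pairwise_map_const (d : Int) (l : List Int) :
    (l.map (fun _ => d)).Pairwise (· ≤ ·) := by
  induction l with
  | nil => exact List.Pairwise.nil
  | cons a l ih =>
    refine List.Pairwise.cons ?_ ih
    intro b hb
    rcases List.mem_map.1 hb with ⟨c, _, rfl⟩
    exact le_refl d

-- THE CORRESPONDENCE. A's queue is the zip of the unscanned suffixes of B's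
-- visited/depth lists; the hypotheses are the BFS invariants (depth suffix is
-- nondecreasing and spans at most two consecutive levels, md is the depth of
-- the last scanned node).
theorem loop_corr (graph : List (Int × List Int)) :
    ∀ (vp vs dp dss : List Int) (md : Int),
    dp.length = vp.length → dss.length = vs.length →
    (∀ a ∈ dss, md ≤ a) →
    dss.Pairwise (· ≤ ·) →
    (∀ a ∈ dss, a ≤ dss.headD md + 1) →
    (dss = [] → md = dp.getLastD 0) →
    loopA graph (vs.zip dss) (vp ++ vs) md = loopScan graph (vp ++ vs) (dp ++ dss) dp.length := by
  intro vp vs dp dss md h1 h2 h3 h4 h5 h6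
  cases vs with
  | nil =>
    have hdss : dss = [] := List.eq_nil_of_length_eq_zero (by simpa using h2)
    subst hdss
    simp only [List.zip_nil_left, List.append_nil]
    rw [loopA, loopScan]
    simp [h1, h6 rfl]
  | cons node vs' =>
    cases dss with
    | nil => simp at h2
    | cons d dss' =>
      have hd_le : md ≤ d := h3 d (List.mem_cons_self ..)
      have hmd' : (if d > md then d else md) = d := by split <;> omega
      have hguard : dp.length < (vp ++ node :: vs').length := by
        simp [h1]
      have hgv : (vp ++ node :: vs').getD dp.length 0 = node := by
        rw [h1]; exact pvGetD_middle vp vs' node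
      have hgd : (dp ++ d :: dss').getD dp.length 0 = d := pvGetD_middle dp dss' d
      -- head relations for the new suffix invariants
      have h3' : ∀ a ∈ dss', d ≤ a := fun a ha => (List.pairwise_cons.1 h4).1 a ha
      have h5d : ∀ a ∈ d :: dss', a ≤ d + 1 := by simpa using h5
      rw [loopScan, dif_pos hguard, hgv, hgd]
      simp only [List.zip_cons_cons]
      rw [loopA]
      simp only [hmd']
      split
      case _ hg =>
        have hgetd : (PySem.Dict.mk graph).getD node [] = [] := by
          rw [PySem.Dict.getD_eq_get?_getD, hg]; rfl
        rw [hgetd]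
        simp only [List.foldl_nil]
        have := loop_corr graph (vp ++ [node]) vs' (dp ++ [d]) dss' d
          (by simp [h1]) (by simpa using h2)
          h3' (List.pairwise_cons.1 h4).2
          (by
            intro a ha
            have h1a := h5d a (List.mem_cons_of_mem _ ha)
            cases dss' with
            | nil => cases ha
            | cons b l =>
              have : d ≤ b := h3' b (List.mem_cons_self ..)
              simp only [List.headD_cons] at *
              omega)
          (by intro _; simp)
        simpa [List.append_assoc] using this
      case _ ns hg =>
        have hgetd : (PySem.Dict.mk graph).getD node [] = ns := by
          rw [PySem.Dict.getD_eq_get?_getD, hg]; rfl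
        rw [hgetd]
        obtain ⟨new, hA, hB, hnew⟩ := fold_corr d ns (vs'.zip dss') (vp ++ node :: vs') (dp ++ d :: dss')
        rw [hA, hB]
        have hnewflat : ∀ x ∈ new, x ∈ pvFlat graph ∧ x ∉ vp ++ node :: vs' := fun x hx =>
          ⟨pvMem_flat_of_get? graph node ns x hg (hnew x hx).1, (hnew x hx).2⟩
        -- reshape A's queue as a zip of the new suffixes
        have hzip : vs'.zip dss' ++ new.map (fun n => (n, d + 1))
            = (vs' ++ new).zip (dss' ++ new.map (fun _ => d + 1)) := by
          rw [List.zip_append (by simpa using h2.symm), zip_map_const]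
        have h3'' : ∀ a ∈ dss' ++ new.map (fun _ => d + 1), d ≤ a := by
          intro a ha
          rcases List.mem_append.1 ha with h | h
          · exact h3' a h
          · rcases List.mem_map.1 h with ⟨c, _, rfl⟩; omega
        have ih := loop_corr graph (vp ++ [node]) (vs' ++ new) (dp ++ [d])
          (dss' ++ new.map (fun _ => d + 1)) d
          (by simp [h1])
          (by have : dss'.length = vs'.length := by simpa using h2
              simp [this])
          h3''
          (by
            rw [List.pairwise_append]
            refine ⟨(List.pairwise_cons.1 h4).2, pairwise_map_const _ _, ?_⟩
            intro a ha b hb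
            rcases List.mem_map.1 hb with ⟨c, _, rfl⟩
            exact h5d a (List.mem_cons_of_mem _ ha))
          (by
            intro a ha
            have hup : a ≤ d + 1 := by
              rcases List.mem_append.1 ha with h | h
              · exact h5d a (List.mem_cons_of_mem _ h)
              · rcases List.mem_map.1 h with ⟨c, _, rfl⟩; omega
            cases hsuf : dss' ++ new.map (fun _ => d + 1) with
            | nil => rw [hsuf] at ha; cases ha
            | cons b l =>
              have hb : b ∈ dss' ++ new.map (fun _ => d + 1) := by rw [hsuf]; exact List.mem_cons_self ..
              have := h3'' b hb
              simp only [List.headD_cons]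
              omega)
          (by
            intro hnil
            have : new.map (fun _ => d + 1) = [] := (List.append_eq_nil_iff.1 hnil).2
            simp)
        rw [hzip]
        have hvshape : (vp ++ [node]) ++ (vs' ++ new) = (vp ++ node :: vs') ++ new := by
          simp [List.append_assoc]
        have hdshape : (dp ++ [d]) ++ (dss' ++ new.map (fun _ => d + 1))
            = (dp ++ d :: dss') ++ new.map (fun _ => d + 1) := by
          simp [List.append_assoc]
        rw [hvshape, hdshape] at ih
        simpa using ih
termination_by vp vs _ _ _ => (pvUnvis graph (vp ++ vs), vs.length)
decreasing_by
  · subst_vars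
    have e : vp ++ [node] ++ vs' = vp ++ node :: vs' := by simp
    rw [e]
    exact Prod.Lex.right _ (by simp)
  · subst_vars
    by_cases hne : new = []
    · subst hne
      have e : vp ++ [node] ++ (vs' ++ ([] : List Int)) = vp ++ node :: vs' := by simp
      rw [e]
      exact Prod.Lex.right _ (by simp)
    · have e : vp ++ [node] ++ (vs' ++ new) = (vp ++ node :: vs') ++ new := by simp
      rw [e]
      exact Prod.Lex.left _ _ (pvUnvis_lt graph (vp ++ node :: vs') new hne hnewflat)

-- ===== VERDICT (by name: the statement is the Claim_ definition above) =====
theorem standard_BFS_spec : Claim_equal_standard_BFS := by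
  intro root graph _
  unfold Spec_standard_BFS standard_BFS standard_BFS_alt
  have h := loop_corr graph [] [root] [] [0] 0
    rfl rfl (by simp) (by simp) (by simp) (by intro h; cases h)
  simpa using h
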